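-- pv_equiv track=rewrite | github.com/OST-Observatory/ost_photometry_package | src/ost_photometry/utilities.py | indices_to_slices
-- ===== SOURCE A (Python) =====
-- def indices_to_slices(a):
--     """
--         Convert a list of indices to slices for an array
--
--         Parameters
--         ----------
--         a               : `list`
--             List of indices
--
--         Returns
--         -------
--         slices          : `list`
--             List of slices
--     """
--     it = iter(a)
--     start = next(it)
--     slices = []
--     for i, x in enumerate(it):
--         if x - a[i] != 1:
--             end = a[i]
--             if start == end:
--                 slices.append([start])
--             else:
--                 slices.append([start, end])
--             start = x
--     if a[-1] == start:
--         slices.append([start])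
--     else:
--         slices.append([start, a[-1]])
--
--     return slices
-- ===== SOURCE B (Python) =====
-- def indices_to_slices(a):
--     runs = [[a[0]]]
--     for prev, x in zip(a, a[1:]):
--         if x - prev == 1:
--             runs[-1].append(x)
--         else:
--             runs.append([x])
--     return [[r[0]] if len(r) == 1 else [r[0], r[-1]] for r in runs]
-- ===== Notes on version B (the rewrite author's own statement) =====
-- stated objective: simpler
-- what changed: B first groups the indices into explicit consecutive runs by zipping adjacent pairs (no index arithmetic into a, no running start variable), then maps each run to its slice; A tracks a running start and emits slices inside one indexed loop plus a trailing flush.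
-- outside the precondition, e.g. on indices_to_slices([]): A raises StopIteration, B raises IndexError
import Mathlib
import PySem

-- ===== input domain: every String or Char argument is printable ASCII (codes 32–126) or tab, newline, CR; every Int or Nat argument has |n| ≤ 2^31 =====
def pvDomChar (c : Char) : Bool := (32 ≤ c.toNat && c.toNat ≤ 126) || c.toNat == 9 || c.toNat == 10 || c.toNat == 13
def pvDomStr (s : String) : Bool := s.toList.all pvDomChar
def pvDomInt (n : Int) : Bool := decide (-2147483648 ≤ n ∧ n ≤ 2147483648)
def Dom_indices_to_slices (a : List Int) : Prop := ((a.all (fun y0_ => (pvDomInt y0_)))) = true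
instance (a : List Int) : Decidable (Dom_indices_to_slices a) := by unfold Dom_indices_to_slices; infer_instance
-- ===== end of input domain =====

-- B groups the indices into explicit consecutive runs (zip of adjacent pairs) and then maps each
-- run to its slice, instead of A's indexed loop with a running start and a trailing flush; same cost.

-- ===== PORT A =====
-- loop body of A's 'for i, x in enumerate(it)' (state: (slices, start), element: (i, x))
def stepAf (a : List Int) (s : List (List Int) × Int) (p : Int × Int) : List (List Int) × Int :=
  if p.2 - PySem.List.pyGetD a p.1 0 ≠ 1 then
    (s.1 ++ [if s.2 = PySem.List.pyGetD a p.1 0 then [s.2] else [s.2, PySem.List.pyGetD a p.1 0]],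
     p.2)
  else s

def indices_to_slices (a : List Int) : List (List Int) :=
  match a with
  | [] => []  -- Python: 'next(it)' raises StopIteration here; excluded by Pre_
  | start0 :: rest =>
    let st := (PySem.List.enumerate rest 0).foldl (stepAf a) ([], start0)
    if PySem.List.pyGetD a (-1) 0 = st.2 then st.1 ++ [[st.2]]
    else st.1 ++ [[st.2, PySem.List.pyGetD a (-1) 0]]

-- ===== PORT B =====
-- loop body of B's 'for prev, x in zip(a, a[1:])' (state: runs; 'runs[-1].append(x)' / 'runs.append([x])')
def stepBf (runs : List (List Int)) (p : Int × Int) : List (List Int) :=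
  if p.2 - p.1 = 1 then runs.dropLast ++ [(runs.getLast?.getD []) ++ [p.2]]
  else runs ++ [[p.2]]

-- body of B's final list comprehension
def mkRunf (r : List Int) : List Int :=
  if r.length = 1 then [PySem.List.pyGetD r 0 0]
  else [PySem.List.pyGetD r 0 0, PySem.List.pyGetD r (-1) 0]

def indices_to_slices_alt (a : List Int) : List (List Int) :=
  match a with
  | [] => []  -- Python: 'a[0]' raises IndexError here; excluded by Pre_
  | x0 :: _ =>
    let runs := (a.zip (PySem.List.slice a (some 1) none)).foldl stepBf [[x0]]
    runs.map mkRunf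

-- ===== PRECONDITION & SPEC =====
-- Pre_ excludes only the empty list, on which Python A raises StopIteration (and B IndexError).
def Pre_indices_to_slices (a : List Int) : Prop := a ≠ []
instance (a : List Int) : Decidable (Pre_indices_to_slices a) := by unfold Pre_indices_to_slices; infer_instance
def pvWitness_indices_to_slices : List Int := [1, 2, 3, 7]
def Spec_indices_to_slices (a : List Int) (out : List (List Int)) : Prop := out = indices_to_slices_alt a
instance (a : List Int) (out : List (List Int)) : Decidable (Spec_indices_to_slices a out) := by unfold Spec_indices_to_slices; infer_instance

-- ===== CLAIM (what is proved, stated in full; the proofs are below) =====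
def Claim_equal_indices_to_slices : Prop := ∀ (a : List Int), Dom_indices_to_slices a → Pre_indices_to_slices a → Spec_indices_to_slices a (indices_to_slices a)

-- ===== LEMMAS AND PROOFS =====

-- A's loop body with the a[i] lookup already performed (p = (a[i], x)).
def stepAv (s : List (List Int) × Int) (p : Int × Int) : List (List Int) × Int :=
  if p.2 - p.1 ≠ 1 then
    (s.1 ++ [if s.2 = p.1 then [s.2] else [s.2, p.1]], p.2)
  else s

-- A's indexed enumerate-loop reads exactly the adjacent pairs of `a`.
lemma enum_lookup_map (a : List Int) :
    ∀ (rest : List Int) (s : Nat), s + rest.length ≤ a.length →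
      (PySem.List.enumerate rest (s : Int)).map
        (fun p => (PySem.List.pyGetD a p.1 0, p.2)) = (a.drop s).zip rest := by
  intro rest
  induction rest with
  | nil => intro s _; simp [PySem.List.enumerate_nil]
  | cons x rest ih =>
    intro s hs
    have hlt : s < a.length := by simp at hs; omega
    rw [PySem.List.enumerate_cons, List.map_cons,
        List.drop_eq_getElem_cons hlt, List.zip_cons_cons]
    have h1 : ((s : Int) + 1) = ((s + 1 : Nat) : Int) := by push_cast; ring
    rw [h1, ih (s + 1) (by simp at hs ⊢; omega)]
    congr 1
    simp [List.getElem?_eq_getElem hlt]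

lemma fold_A_to_pairs (a rest : List Int) (init : List (List Int) × Int)
    (h : rest.length + 1 ≤ a.length) :
    (PySem.List.enumerate rest 0).foldl (stepAf a) init
      = (a.zip rest).foldl stepAv init := by
  have hg : (PySem.List.enumerate rest 0).foldl (stepAf a) init
      = ((PySem.List.enumerate rest 0).map
          (fun p => (PySem.List.pyGetD a p.1 0, p.2))).foldl stepAv init := by
    rw [List.foldl_map]; rfl
  rw [hg]
  have h2 := enum_lookup_map a rest 0 (by omega)
  simp only [Nat.cast_zero, List.drop_zero] at h2
  rw [h2]

-- mkRunf of an invariant-satisfying run is A's emitted slice.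
lemma mkRunf_inv (r : List Int) (start prev : Int) (hne : r ≠ [])
    (hh : r.head? = some start) (hl : r.getLast? = some prev)
    (hiff : start = prev ↔ r.length = 1) :
    mkRunf r = if start = prev then [start] else [start, prev] := by
  have h0 : PySem.List.pyGetD r 0 0 = start := by
    rw [PySem.List.pyGetD_zero]
    cases r with
    | nil => exact absurd rfl hne
    | cons y t => simp at hh; simp [hh]
  have hn : PySem.List.pyGetD r (-1) 0 = prev := by
    rw [PySem.List.pyGetD_neg_one r 0 hne]
    rw [List.getLast?_eq_some_getLast hne] at hl
    simpa using hl
  by_cases hsp : start = prev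
  · simp [mkRunf, hiff.mp hsp, h0, hsp]
  · have : r.length ≠ 1 := fun h => hsp (hiff.mpr h)
    simp [mkRunf, this, h0, hn, hsp]

-- Main loop invariant: A's running-start loop and B's run-grouping loop agree
-- on the remaining adjacent pairs.
lemma main_inv :
    ∀ (rest : List Int) (prev start : Int) (runs : List (List Int)) (r : List Int),
      r ≠ [] → r.head? = some start → r.getLast? = some prev → start ≤ prev →
      (start = prev ↔ r.length = 1) →
      (let st := ((prev :: rest).zip rest).foldl stepAv (runs.map mkRunf, start)
       if ((prev :: rest).getLast?).getD 0 = st.2 then st.1 ++ [[st.2]]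
       else st.1 ++ [[st.2, ((prev :: rest).getLast?).getD 0]])
      = (((prev :: rest).zip rest).foldl stepBf (runs ++ [r])).map mkRunf := by
  intro rest
  induction rest with
  | nil =>
    intro prev start runs r hne hh hl hle hiff
    simp only [List.zip_nil_right, List.foldl_nil, List.getLast?_singleton,
      Option.getD_some, List.map_append, List.map_cons, List.map_nil]
    rw [mkRunf_inv r start prev hne hh hl hiff]
    by_cases hsp : start = prev
    · simp [hsp]
    · simp [hsp, Ne.symm hsp]
  | cons y rest ih =>
    intro prev start runs r hne hh hl hle hiff
    rw [List.zip_cons_cons, List.foldl_cons, List.foldl_cons,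
        List.getLast?_cons_cons]
    by_cases hdiff : y - prev = 1
    · have hA : stepAv (runs.map mkRunf, start) (prev, y) = (runs.map mkRunf, start) := by
        simp [stepAv, hdiff]
      have hB : stepBf (runs ++ [r]) (prev, y) = runs ++ [r ++ [y]] := by
        simp [stepBf, hdiff]
      rw [hA, hB]
      exact ih y start runs (r ++ [y]) (by simp)
        (by rw [List.head?_append, hh]; rfl)
        (by simp)
        (by omega)
        (by constructor
            · intro h; exfalso; omega
            · intro h; exfalso
              simp at h
              exact hne h)
    · have hA : stepAv (runs.map mkRunf, start) (prev, y)
          = (runs.map mkRunf ++ [if start = prev then [start] else [start, prev]], y) := by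
        simp [stepAv, hdiff]
      have hB : stepBf (runs ++ [r]) (prev, y) = (runs ++ [r]) ++ [[y]] := by
        simp [stepBf, hdiff]
      rw [hA, hB]
      rw [← mkRunf_inv r start prev hne hh hl hiff]
      have := ih y y (runs ++ [r]) [y] (by simp) (by simp) (by simp) (by omega) (by simp)
      simp only [List.map_append, List.map_cons, List.map_nil] at this
      exact this

-- ===== VERDICT (by name: the statement is the Claim_ definition above) =====
theorem indices_to_slices_spec : Claim_equal_indices_to_slices := by
  intro a _ hpre
  unfold Spec_indices_to_slices
  match a, hpre with
  | x0 :: rest, _ =>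
    simp only [indices_to_slices, indices_to_slices_alt, PySem.List.slice_from_one,
      List.tail_cons]
    have hlast : PySem.List.pyGetD (x0 :: rest) (-1) 0
        = (((x0 :: rest).getLast?).getD 0) := by
      rw [PySem.List.pyGetD_neg_one (x0 :: rest) 0 (by simp),
          List.getLast?_eq_some_getLast (l := x0 :: rest) (by simp)]
      rfl
    rw [fold_A_to_pairs (x0 :: rest) rest _ (by simp), hlast]
    have := main_inv rest x0 x0 [] [x0] (by simp) (by simp) (by simp) (by omega) (by simp)
    simpa using this
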